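-- pv_equiv track=rewrite | github.com/JosephVankelegom/INGInious-problems-sublabel | inginious_problems_sublabel/sublabel_problem.py | at_least_one_intersection
-- ===== SOURCE A (Python) =====
-- def intersect(interval1, interval2):
--     if interval1[1] <= interval2[0] or interval2[1] <= interval1[0]:
--         return False
--     else:
--         return True
--
-- def at_least_one_intersection(array1, array2):
--     for interval1 in array1:
--         if len(interval1) < 2 : continue
--         for interval2 in array2:
--             if len(interval2) < 2 : continue
--             if intersect(interval1, interval2):
--                 return True
--     return False
-- ===== SOURCE B (Python) =====
-- def at_least_one_intersection(array1, array2):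
--     # sort-and-sweep: array2's intervals sorted by start, array1's sorted by
--     # end; one pointer + a running max of ends replaces the inner scan
--     ys = sorted(((iv[0], iv[1]) for iv in array2 if len(iv) >= 2),
--                 key=lambda p: p[0])
--     qs = sorted(((iv[1], iv[0]) for iv in array1 if len(iv) >= 2),
--                 key=lambda p: p[0])
--     j = 0
--     best = None
--     for e1, s1 in qs:
--         while j < len(ys) and ys[j][0] < e1:
--             if best is None or ys[j][1] > best:
--                 best = ys[j][1]
--             j += 1
--         if best is not None and best > s1:
--             return True
--     return False
-- ===== Notes on version B (the rewrite author's own statement) =====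
-- stated objective: alternative
-- what changed: Replaces A's nested all-pairs scan with a sort-and-sweep: array2's intervals are sorted by start and array1's by end, then one pointer with a running maximum of ends decides overlap in a single merge pass.
import Mathlib
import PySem

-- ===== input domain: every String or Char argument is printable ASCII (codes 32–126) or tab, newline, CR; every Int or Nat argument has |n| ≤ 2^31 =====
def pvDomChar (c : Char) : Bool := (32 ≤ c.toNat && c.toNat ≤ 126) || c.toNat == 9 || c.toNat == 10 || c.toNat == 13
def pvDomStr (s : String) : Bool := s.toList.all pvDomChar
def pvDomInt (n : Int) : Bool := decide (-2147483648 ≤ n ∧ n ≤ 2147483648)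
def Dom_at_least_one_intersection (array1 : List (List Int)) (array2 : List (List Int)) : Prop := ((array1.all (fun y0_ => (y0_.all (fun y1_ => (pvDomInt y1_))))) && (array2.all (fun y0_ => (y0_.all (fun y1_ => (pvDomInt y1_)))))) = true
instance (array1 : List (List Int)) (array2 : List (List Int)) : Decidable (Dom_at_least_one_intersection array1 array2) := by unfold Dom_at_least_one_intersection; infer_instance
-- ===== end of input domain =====

-- B replaces A's nested pairwise scan by sort-and-sweep: sort array2's
-- intervals by start, array1's by end; one pointer + a running max of ends.

-- ===== PORT A =====
def pyIntersect (interval1 : List Int) (interval2 : List Int) : Bool :=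
  -- interval1[1], interval2[0], interval2[1], interval1[0]; callers guard len ≥ 2 so pyGet? is some
  match PySem.List.pyGet? interval1 1, PySem.List.pyGet? interval2 0,
        PySem.List.pyGet? interval2 1, PySem.List.pyGet? interval1 0 with
  | some a1, some b0, some b1, some a0 => if a1 ≤ b0 ∨ b1 ≤ a0 then false else true
  | _, _, _, _ => false

def aInner (interval1 : List Int) : List (List Int) → Bool
  | [] => false
  | i2 :: rest =>
    if i2.length < 2 then aInner interval1 rest
    else if pyIntersect interval1 i2 then true else aInner interval1 rest

def aOuter (array2 : List (List Int)) : List (List Int) → Bool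
  | [] => false
  | i1 :: rest =>
    if i1.length < 2 then aOuter array2 rest
    else if aInner i1 array2 then true else aOuter array2 rest

def at_least_one_intersection (array1 : List (List Int)) (array2 : List (List Int)) : Bool :=
  aOuter array2 array1

-- ===== PORT B =====
-- (iv[0], iv[1]) for iv in arr if len(iv) >= 2
def bPairs01 (arr : List (List Int)) : List (Int × Int) :=
  arr.filterMap (fun iv =>
    if iv.length < 2 then none else
    match PySem.List.pyGet? iv 0, PySem.List.pyGet? iv 1 with
    | some s, some e => some (s, e)
    | _, _ => none)

-- (iv[1], iv[0]) for iv in arr if len(iv) >= 2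
def bPairs10 (arr : List (List Int)) : List (Int × Int) :=
  arr.filterMap (fun iv =>
    if iv.length < 2 then none else
    match PySem.List.pyGet? iv 1, PySem.List.pyGet? iv 0 with
    | some e, some s => some (e, s)
    | _, _ => none)

-- the inner while loop: consume ys while start < e1, keeping best = running max of ends
def bAdvance : List (Int × Int) → Option Int → Int → List (Int × Int) × Option Int
  | [], best, _ => ([], best)
  | (s, e) :: ys, best, e1 =>
    if s < e1 then
      bAdvance ys (some (match best with | none => e | some b => if e > b then e else b)) e1
    else ((s, e) :: ys, best)

-- the for loop over qs with early return
def bSweep : List (Int × Int) → List (Int × Int) → Option Int → Bool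
  | [], _, _ => false
  | (e1, s1) :: qs, ys, best =>
    let r := bAdvance ys best e1
    if (match r.2 with | some b => decide (s1 < b) | none => false) then true
    else bSweep qs r.1 r.2

def at_least_one_intersection_alt (array1 : List (List Int)) (array2 : List (List Int)) : Bool :=
  bSweep (PySem.List.sorted (bPairs10 array1) (fun p => p.1) false)
         (PySem.List.sorted (bPairs01 array2) (fun p => p.1) false)
         none

-- ===== PRECONDITION & SPEC =====
def Spec_at_least_one_intersection (array1 : List (List Int)) (array2 : List (List Int)) (out : Bool) : Prop := out = at_least_one_intersection_alt array1 array2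
instance (array1 : List (List Int)) (array2 : List (List Int)) (out : Bool) : Decidable (Spec_at_least_one_intersection array1 array2 out) := by unfold Spec_at_least_one_intersection; infer_instance

-- ===== CLAIM (what is proved, stated in full; the proofs are below) =====
def Claim_equal_at_least_one_intersection : Prop := ∀ (array1 : List (List Int)) (array2 : List (List Int)), Dom_at_least_one_intersection array1 array2 → Spec_at_least_one_intersection array1 array2 (at_least_one_intersection array1 array2)

-- ===== LEMMAS AND PROOFS =====

-- overlap of query q = (e1, s1) against interval y = (s2, e2)
def ov (q y : Int × Int) : Prop := y.1 < q.1 ∧ q.2 < y.2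

-- "best beats s": the check performed against the running maximum
def bestGt (best : Option Int) (s : Int) : Bool :=
  match best with | some b => decide (s < b) | none => false

lemma len_ge_two_shape (iv : List Int) (h : ¬ iv.length < 2) :
    ∃ x y t, iv = x :: y :: t := by
  match iv with
  | [] => simp at h
  | [x] => simp at h
  | x :: y :: t => exact ⟨x, y, t, rfl⟩

lemma pyIntersect_cons (a0 a1 b0 b1 : Int) (t u : List Int) :
    pyIntersect (a0 :: a1 :: t) (b0 :: b1 :: u) = (decide (b0 < a1) && decide (a0 < b1)) := by
  simp only [pyIntersect, pysem, List.getElem?_cons_succ, List.getElem?_cons_zero]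
  split_ifs with h <;> simp_all
  omega

lemma aInner_iff (i1 : List Int) (a2 : List (List Int)) :
    aInner i1 a2 = true ↔ ∃ i2 ∈ a2, ¬ i2.length < 2 ∧ pyIntersect i1 i2 = true := by
  induction a2 with
  | nil => simp [aInner]
  | cons h t ih =>
    simp only [aInner]
    split_ifs with h1 h2 <;> simp_all

lemma aOuter_iff (a1 a2 : List (List Int)) :
    aOuter a2 a1 = true ↔
      ∃ i1 ∈ a1, ¬ i1.length < 2 ∧ ∃ i2 ∈ a2, ¬ i2.length < 2 ∧ pyIntersect i1 i2 = true := by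
  induction a1 with
  | nil => simp [aOuter]
  | cons h t ih =>
    simp only [aOuter]
    split_ifs with h1 h2 <;> simp_all [aInner_iff]

lemma mem_bPairs01 (arr : List (List Int)) (y : Int × Int) :
    y ∈ bPairs01 arr ↔ ∃ iv ∈ arr, ¬ iv.length < 2 ∧ iv.take 2 = [y.1, y.2] := by
  simp only [bPairs01, List.mem_filterMap]
  constructor
  · rintro ⟨iv, hm, hv⟩
    split_ifs at hv with h
    obtain ⟨x, z, t, rfl⟩ := len_ge_two_shape iv h
    simp only [pysem, List.getElem?_cons_succ, List.getElem?_cons_zero] at hv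
    injection hv with hv
    exact ⟨_, hm, h, by simp [← hv]⟩
  · rintro ⟨iv, hm, h, ht⟩
    obtain ⟨x, z, t, rfl⟩ := len_ge_two_shape iv h
    simp at ht
    refine ⟨_, hm, ?_⟩
    simp [pysem, ht.1, ht.2]

lemma mem_bPairs10 (arr : List (List Int)) (q : Int × Int) :
    q ∈ bPairs10 arr ↔ ∃ iv ∈ arr, ¬ iv.length < 2 ∧ iv.take 2 = [q.2, q.1] := by
  simp only [bPairs10, List.mem_filterMap]
  constructor
  · rintro ⟨iv, hm, hv⟩
    split_ifs at hv with h
    obtain ⟨x, z, t, rfl⟩ := len_ge_two_shape iv h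
    simp only [pysem, List.getElem?_cons_succ, List.getElem?_cons_zero] at hv
    injection hv with hv
    exact ⟨_, hm, h, by simp [← hv]⟩
  · rintro ⟨iv, hm, h, ht⟩
    obtain ⟨x, z, t, rfl⟩ := len_ge_two_shape iv h
    simp at ht
    refine ⟨_, hm, ?_⟩
    simp [pysem, ht.1, ht.2]

lemma bAdvance_spec (ys : List (Int × Int)) (best : Option Int) (e1 : Int) :
    (bAdvance ys best e1).1 = ys.dropWhile (fun y => decide (y.1 < e1)) ∧
    ∀ s, bestGt (bAdvance ys best e1).2 s =
      (bestGt best s || (ys.takeWhile (fun y => decide (y.1 < e1))).any (fun y => decide (s < y.2))) := by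
  induction ys generalizing best with
  | nil => simp [bAdvance]
  | cons h t ih =>
    obtain ⟨s2, e2⟩ := h
    by_cases hc : s2 < e1
    · cases best with
      | none =>
        have heq : bAdvance ((s2, e2) :: t) none e1 = bAdvance t (some e2) e1 := by
          simp [bAdvance, hc]
        rw [heq]
        obtain ⟨ih1, ih2⟩ := ih (some e2)
        refine ⟨by rw [ih1]; simp [List.dropWhile, hc], fun s => ?_⟩
        rw [ih2 s]
        simp [bestGt, List.takeWhile, hc, List.any_cons, Bool.or_comm (decide (s < e2))]
      | some b =>
        have heq : bAdvance ((s2, e2) :: t) (some b) e1 =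
            bAdvance t (some (if e2 > b then e2 else b)) e1 := by
          simp [bAdvance, hc]
        rw [heq]
        obtain ⟨ih1, ih2⟩ := ih (some (if e2 > b then e2 else b))
        refine ⟨by rw [ih1]; simp [List.dropWhile, hc], fun s => ?_⟩
        rw [ih2 s]
        have hb : bestGt (some (if e2 > b then e2 else b)) s =
            (bestGt (some b) s || decide (s < e2)) := by
          simp only [bestGt]; split_ifs with h2 <;> simp <;> omega
        rw [hb]
        simp [List.takeWhile, hc, List.any_cons, Bool.or_assoc, Bool.or_comm (decide (s < e2))]
    · simp [bAdvance, hc, List.dropWhile, List.takeWhile, bestGt]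

lemma mem_dropWhile_not_lt (e1 : Int) (ys : List (Int × Int))
    (hys : ys.Pairwise (fun a b => a.1 ≤ b.1)) :
    ∀ y ∈ ys.dropWhile (fun y => decide (y.1 < e1)), ¬ (y.1 < e1) := by
  induction ys with
  | nil => simp
  | cons h t ih =>
    rw [List.pairwise_cons] at hys
    by_cases hc : h.1 < e1
    · simpa [List.dropWhile, hc] using ih hys.2
    · intro y hy
      simp only [List.dropWhile, hc] at hy
      rcases List.mem_cons.mp hy with rfl | hy
      · exact hc
      · have := hys.1 y hy; omega

lemma bSweep_iff (qs : List (Int × Int)) (P ys : List (Int × Int)) (best : Option Int)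
    (hys : ys.Pairwise (fun a b => a.1 ≤ b.1))
    (hqs : qs.Pairwise (fun a b => a.1 ≤ b.1))
    (hP : ∀ p ∈ P, ∀ q ∈ qs, p.1 < q.1)
    (hbest : ∀ s, bestGt best s = P.any (fun y => decide (s < y.2))) :
    bSweep qs ys best = true ↔ ∃ q ∈ qs, ∃ y ∈ P ++ ys, ov q y := by
  induction qs generalizing P ys best with
  | nil => simp [bSweep]
  | cons q qs ih =>
    obtain ⟨e1, s1⟩ := q
    rw [List.pairwise_cons] at hqs
    obtain ⟨hadv1, hadv2⟩ := bAdvance_spec ys best e1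
    set T := ys.takeWhile (fun y => decide (y.1 < e1)) with hT
    set R := ys.dropWhile (fun y => decide (y.1 < e1)) with hR
    have hTR : T ++ R = ys := List.takeWhile_append_dropWhile
    have hTmem : ∀ y ∈ T, y.1 < e1 := fun y hy => by simpa using List.mem_takeWhile_imp hy
    have hcheck : bestGt (bAdvance ys best e1).2 s1 = (P ++ T).any (fun y => decide (s1 < y.2)) := by
      rw [hadv2 s1, hbest s1, List.any_append]
    have hPlt : ∀ p ∈ P, p.1 < e1 := fun p hp => hP p hp (e1, s1) List.mem_cons_self
    have hfull : ((P ++ T).any (fun y => decide (s1 < y.2)) = true) ↔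
        (∃ y ∈ P ++ ys, ov (e1, s1) y) := by
      rw [List.any_eq_true]
      constructor
      · rintro ⟨y, hy, hs⟩
        rcases List.mem_append.mp hy with h' | h'
        · exact ⟨y, List.mem_append.mpr (Or.inl h'), hPlt y h', by simpa using hs⟩
        · exact ⟨y, List.mem_append.mpr (Or.inr (hTR ▸ List.mem_append.mpr (Or.inl h'))),
            hTmem y h', by simpa using hs⟩
      · rintro ⟨y, hy, h1, h2⟩
        refine ⟨y, ?_, by simpa using h2⟩
        rcases List.mem_append.mp hy with h' | h'
        · exact List.mem_append.mpr (Or.inl h')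
        · rcases List.mem_append.mp (show y ∈ T ++ R from hTR ▸ h') with h'' | h''
          · exact List.mem_append.mpr (Or.inr h'')
          · exact absurd h1 (mem_dropWhile_not_lt e1 ys hys y h'')
    have hstep : bSweep ((e1, s1) :: qs) ys best =
        if bestGt (bAdvance ys best e1).2 s1 then true
        else bSweep qs (bAdvance ys best e1).1 (bAdvance ys best e1).2 := rfl
    rw [hstep]
    by_cases hc : bestGt (bAdvance ys best e1).2 s1 = true
    · rw [if_pos hc]
      exact iff_of_true rfl ⟨(e1, s1), List.mem_cons_self, hfull.mp (hcheck ▸ hc)⟩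
    · rw [if_neg hc, hadv1]
      have hbest' : ∀ s, bestGt (bAdvance ys best e1).2 s =
          (P ++ T).any (fun y => decide (s < y.2)) := by
        intro s; rw [hadv2 s, hbest s, List.any_append]
      have hRs : R.Pairwise (fun a b : Int × Int => a.1 ≤ b.1) :=
        List.Pairwise.sublist (hR ▸ List.dropWhile_sublist _) hys
      have hP' : ∀ p ∈ P ++ T, ∀ q ∈ qs, p.1 < q.1 := by
        intro p hp q' hq'
        rcases List.mem_append.mp hp with h' | h'
        · exact hP p h' q' (List.mem_cons_of_mem _ hq')
        · have := hqs.1 q' hq'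
          have := hTmem p h'
          omega
      rw [ih (P ++ T) R (bAdvance ys best e1).2 hRs hqs.2 hP' hbest',
        show (P ++ T) ++ R = P ++ ys by rw [List.append_assoc, hTR]]
      constructor
      · rintro ⟨q', hq', rest⟩
        exact ⟨q', List.mem_cons_of_mem _ hq', rest⟩
      · rintro ⟨q', hq', rest⟩
        rcases List.mem_cons.mp hq' with rfl | hq'
        · have := hfull.mpr rest
          rw [← hcheck] at this
          exact absurd this hc
        · exact ⟨q', hq', rest⟩

lemma a_iff_pairs (a1 a2 : List (List Int)) :
    at_least_one_intersection a1 a2 = true ↔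
      ∃ q ∈ bPairs10 a1, ∃ y ∈ bPairs01 a2, ov q y := by
  show aOuter a2 a1 = true ↔ _
  rw [aOuter_iff]
  constructor
  · rintro ⟨i1, h1m, h1l, i2, h2m, h2l, hint⟩
    obtain ⟨x1, z1, t1, rfl⟩ := len_ge_two_shape i1 h1l
    obtain ⟨x2, z2, t2, rfl⟩ := len_ge_two_shape i2 h2l
    rw [pyIntersect_cons] at hint
    simp only [Bool.and_eq_true, decide_eq_true_eq] at hint
    refine ⟨(z1, x1), (mem_bPairs10 _ _).mpr ⟨_, h1m, h1l, by simp⟩,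
      (x2, z2), (mem_bPairs01 _ _).mpr ⟨_, h2m, h2l, by simp⟩, hint.1, hint.2⟩
  · rintro ⟨q, hq, y, hy, hov1, hov2⟩
    obtain ⟨i1, h1m, h1l, ht1⟩ := (mem_bPairs10 _ _).mp hq
    obtain ⟨i2, h2m, h2l, ht2⟩ := (mem_bPairs01 _ _).mp hy
    obtain ⟨x1, z1, t1, rfl⟩ := len_ge_two_shape i1 h1l
    obtain ⟨x2, z2, t2, rfl⟩ := len_ge_two_shape i2 h2l
    simp at ht1 ht2
    refine ⟨_, h1m, h1l, _, h2m, h2l, ?_⟩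
    rw [pyIntersect_cons]
    simp only [Bool.and_eq_true, decide_eq_true_eq]
    omega

lemma b_iff_pairs (a1 a2 : List (List Int)) :
    at_least_one_intersection_alt a1 a2 = true ↔
      ∃ q ∈ bPairs10 a1, ∃ y ∈ bPairs01 a2, ov q y := by
  show bSweep _ _ none = true ↔ _
  rw [bSweep_iff _ [] _ none (PySem.List.sorted_pairwise _ _)
    (PySem.List.sorted_pairwise _ _) (by simp) (by simp [bestGt])]
  simp only [List.nil_append, PySem.List.mem_sorted]

-- ===== VERDICT (by name: the statement is the Claim_ definition above) =====
theorem at_least_one_intersection_spec : Claim_equal_at_least_one_intersection := by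
  intro a1 a2 _
  unfold Spec_at_least_one_intersection
  rcases hb : at_least_one_intersection_alt a1 a2 with _ | _
  · rcases ha : at_least_one_intersection a1 a2 with _ | _
    · rfl
    · exact absurd (hb ▸ (b_iff_pairs a1 a2).mpr ((a_iff_pairs a1 a2).mp ha)) (by simp)
  · exact (a_iff_pairs a1 a2).mpr ((b_iff_pairs a1 a2).mp hb)
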